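-- pv_equiv track=rewrite | github.com/gabefoley/digital_notebook | testing/dialign_test.py | get_anchor_dict
-- ===== SOURCE A (Python) =====
-- def get_anchor_dict(template):
--     """
--     Take a singled aligned sequence and create a dictionary that maps the start position of a set of aligned columns to
--     the length of the uninterrupted run of aligned columns
--     :param template:
--     :return:
--     """
--     anchor_dict = {}
--     pos = 0
--     while pos < len(template):
--         length = 1
--         if template[pos].isupper():
--             start_pos = pos
--             while pos + 1 < len(template) and template[pos + 1].isupper():
--                 pos += 1
--                 length += 1
--             anchor_dict[start_pos] = length
--         pos += 1
--     return anchor_dict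
-- ===== SOURCE B (Python) =====
-- def get_anchor_dict(template):
--     # Right-to-left pass: keep the length of the uppercase run starting at the
--     # current position; a run start is an uppercase char whose left neighbour
--     # is absent or not uppercase. Entries come out back-to-front, so reverse.
--     entries = []
--     run = 0
--     for i in range(len(template) - 1, -1, -1):
--         if template[i].isupper():
--             run += 1
--             if i == 0 or not template[i - 1].isupper():
--                 entries.append((i, run))
--         else:
--             run = 0
--     return dict(reversed(entries))
-- ===== Notes on version B (the rewrite author's own statement) =====
-- stated objective: alternative
-- what changed: Instead of A's nested forward while-loops that walk each uppercase run with an inner scan, B makes a single right-to-left pass keeping a suffix run counter, detects run starts by inspecting the left neighbour, collects (start, run) entries back-to-front and reverses them into the dict.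
import Mathlib
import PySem

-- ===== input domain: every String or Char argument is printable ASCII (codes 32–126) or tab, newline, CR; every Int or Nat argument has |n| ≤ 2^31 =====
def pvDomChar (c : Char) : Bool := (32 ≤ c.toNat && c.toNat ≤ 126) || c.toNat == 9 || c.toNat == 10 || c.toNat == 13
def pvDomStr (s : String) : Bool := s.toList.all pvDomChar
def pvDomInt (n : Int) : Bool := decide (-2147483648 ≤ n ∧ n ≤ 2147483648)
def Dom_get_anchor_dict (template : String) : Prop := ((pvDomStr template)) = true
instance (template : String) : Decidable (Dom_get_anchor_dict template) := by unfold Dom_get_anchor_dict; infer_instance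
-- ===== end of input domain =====

-- B replaces A's nested forward while loops by a single right-to-left pass carrying a
-- suffix run counter; run starts are detected via the left neighbour and the entries,
-- built back-to-front, are reversed into the dict (alternative decomposition).

-- ===== PORT A =====
-- inner `while pos + 1 < len(template) and template[pos+1].isupper()` loop:
-- walks the uppercase run, carrying pos and length; returns final pos, length and rest.
def pvInnerA (cs : List Char) (pos length : Int) : Int × Int × List Char :=
  match cs with
  | [] => (pos, length, [])
  | c :: rest =>
    if PySem.Chars.isupper c then pvInnerA rest (pos + 1) (length + 1)
    else (pos, length, c :: rest)

theorem pvInnerA_len (cs : List Char) (pos length : Int) :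
    (pvInnerA cs pos length).2.2.length ≤ cs.length := by
  induction cs generalizing pos length with
  | nil => simp [pvInnerA]
  | cons c rest ih =>
    simp only [pvInnerA]
    split
    · exact le_trans (ih _ _) (by simp)
    · simp

-- outer `while pos < len(template)` loop on the remaining characters
def pvGoA (cs : List Char) (pos : Int) (d : PySem.Dict Int Int) : PySem.Dict Int Int :=
  match h : cs with
  | [] => d
  | c :: rest =>
    if PySem.Chars.isupper c then
      let r := pvInnerA rest pos 1
      pvGoA r.2.2 (r.1 + 1) (d.insert pos r.2.1)
    else
      pvGoA rest (pos + 1) d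
termination_by cs.length
decreasing_by
  · exact Nat.lt_succ_of_le (pvInnerA_len rest pos 1)
  · simp

def get_anchor_dict (template : String) : List (Int × Int) :=
  (pvGoA template.toList 0 PySem.Dict.empty).items

-- ===== PORT B =====
-- `i == 0 or not template[i-1].isupper()`: prev? = none encodes i == 0
def pvBoundaryPrev (prev? : Option Char) : Bool :=
  match prev? with
  | none => true
  | some p => !PySem.Chars.isupper p

-- the descending `for i in range(len(template)-1, -1, -1)` loop as the obvious
-- right-fold: the recursive call processes the suffix (= the higher indices) first;
-- state is (run, entries); pos is the index of the head char, prev? the char at pos-1.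
def pvGoB (cs : List Char) (pos : Int) (prev? : Option Char) : Int × List (Int × Int) :=
  match cs with
  | [] => (0, [])
  | c :: rest =>
    let st := pvGoB rest (pos + 1) (some c)
    if PySem.Chars.isupper c then
      let run := st.1 + 1
      if pvBoundaryPrev prev? then (run, st.2 ++ [(pos, run)])
      else (run, st.2)
    else (0, st.2)

-- dict(reversed(entries))
def get_anchor_dict_alt (template : String) : List (Int × Int) :=
  (((pvGoB template.toList 0 none).2.reverse).foldl
      (fun d pl => d.insert pl.1 pl.2) (PySem.Dict.empty : PySem.Dict Int Int)).items

-- ===== PRECONDITION & SPEC =====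
def Spec_get_anchor_dict (template : String) (out : List (Int × Int)) : Prop := out = get_anchor_dict_alt template
instance (template : String) (out : List (Int × Int)) : Decidable (Spec_get_anchor_dict template out) := by unfold Spec_get_anchor_dict; infer_instance

-- ===== CLAIM (what is proved, stated in full; the proofs are below) =====
def Claim_equal_get_anchor_dict : Prop := ∀ (template : String), Dom_get_anchor_dict template → Spec_get_anchor_dict template (get_anchor_dict template)

-- ===== LEMMAS AND PROOFS =====

-- "the list starts at a run boundary": empty, or head not uppercase
def pvBd (cs : List Char) : Bool :=
  match cs with
  | [] => true
  | c :: _ => !PySem.Chars.isupper c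

theorem pvBd_dropWhile (l : List Char) : pvBd (l.dropWhile PySem.Chars.isupper) = true := by
  induction l with
  | nil => simp [pvBd]
  | cons c rest ih =>
    by_cases h : PySem.Chars.isupper c
    · simpa [List.dropWhile, h] using ih
    · simp [List.dropWhile, h, pvBd]

theorem pvGoB_prev_irrel (cs : List Char) (pos : Int) (p1 p2 : Option Char)
    (h : pvBd cs = true) : pvGoB cs pos p1 = pvGoB cs pos p2 := by
  match cs with
  | [] => rfl
  | c :: rest =>
    simp only [pvBd, Bool.not_eq_true'] at h
    simp [pvGoB, h]

theorem pvGoB_run_zero (cs : List Char) (pos : Int) (p : Option Char)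
    (h : pvBd cs = true) : (pvGoB cs pos p).1 = 0 := by
  match cs with
  | [] => rfl
  | c :: rest =>
    simp only [pvBd, Bool.not_eq_true'] at h
    simp [pvGoB, h]

-- inside an uppercase run nothing is recorded; the run counter just accumulates
theorem pvGoB_run (us tail : List Char) (pos : Int) (p : Char)
    (hus : ∀ x ∈ us, PySem.Chars.isupper x = true)
    (hp : PySem.Chars.isupper p = true) (htl : pvBd tail = true) :
    pvGoB (us ++ tail) pos (some p) =
      ((us.length : Int), (pvGoB tail (pos + us.length) none).2) := by
  induction us generalizing pos p with
  | nil =>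
    simp only [List.nil_append, List.length_nil, Nat.cast_zero, add_zero]
    rw [pvGoB_prev_irrel tail pos (some p) none htl]
    exact Prod.ext (pvGoB_run_zero tail pos none htl) rfl
  | cons u us' ih =>
    have hu : PySem.Chars.isupper u = true := hus u (by simp)
    have hus' : ∀ x ∈ us', PySem.Chars.isupper x = true := fun x hx => hus x (by simp [hx])
    simp only [List.cons_append, pvGoB, hu, if_pos, pvBoundaryPrev, hp,
      Bool.not_true, Bool.false_eq_true, if_false]
    rw [ih (pos + 1) u hus' hu]
    simp only [List.length_cons, Prod.mk.injEq]
    constructor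
    · push_cast; ring
    · have : pos + 1 + (us'.length : Int) = pos + ((us'.length : Nat) + 1 : Nat) := by
        push_cast; ring
      rw [this]

-- characterisation of A's inner while loop: it consumes exactly the uppercase prefix
theorem pvInnerA_eq (cs : List Char) (pos length : Int) :
    pvInnerA cs pos length =
      (pos + (cs.takeWhile PySem.Chars.isupper).length,
       length + (cs.takeWhile PySem.Chars.isupper).length,
       cs.dropWhile PySem.Chars.isupper) := by
  induction cs generalizing pos length with
  | nil => simp [pvInnerA]
  | cons c rest ih =>
    simp only [pvInnerA, List.takeWhile, List.dropWhile]
    by_cases h : PySem.Chars.isupper c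
    · simp only [h, if_pos, ih, List.length_cons, Prod.mk.injEq]
      refine ⟨by push_cast; ring, by push_cast; ring, trivial⟩
    · simp [h]

-- main bridge: A's dict loop equals folding B's (reversed) entry list
theorem pvGoA_eq (n : Nat) (cs : List Char) (hn : cs.length ≤ n)
    (pos : Int) (d : PySem.Dict Int Int) (prev? : Option Char)
    (hb : pvBoundaryPrev prev? = true) :
    pvGoA cs pos d =
      ((pvGoB cs pos prev?).2.reverse).foldl (fun d pl => d.insert pl.1 pl.2) d := by
  induction n generalizing cs pos d prev? with
  | zero =>
    have : cs = [] := List.eq_nil_of_length_eq_zero (Nat.le_zero.mp hn)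
    subst this; simp [pvGoA, pvGoB]
  | succ n ih =>
    match cs with
    | [] => simp [pvGoA, pvGoB]
    | c :: rest =>
      by_cases h : PySem.Chars.isupper c
      · -- uppercase head: A's inner loop consumes the run; B records at its start
        have hsplit : rest = rest.takeWhile PySem.Chars.isupper
            ++ rest.dropWhile PySem.Chars.isupper := (List.takeWhile_append_dropWhile).symm
        set t := rest.takeWhile PySem.Chars.isupper with ht
        set tl := rest.dropWhile PySem.Chars.isupper with htl
        have htup : ∀ x ∈ t, PySem.Chars.isupper x = true := by
          intro x hx; exact List.mem_takeWhile_imp hx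
        have hbd : pvBd tl = true := pvBd_dropWhile rest
        rw [pvGoA, pvGoB]
        simp only [h, if_pos, pvInnerA_eq, ← ht, ← htl]
        rw [show rest = t ++ tl from hsplit, pvGoB_run t tl (pos + 1) c htup h hbd]
        simp only [hb, if_pos, List.reverse_append, List.reverse_cons, List.reverse_nil,
          List.nil_append, List.singleton_append, List.foldl_cons]
        have hlen : tl.length ≤ n := by
          rw [htl]
          have h1 := List.length_dropWhile_le (p := PySem.Chars.isupper) (l := rest)
          simp only [List.length_cons] at hn
          omega
        rw [ih tl hlen (pos + (t.length : Int) + 1) _ none rfl]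
        have e1 : pos + 1 + (t.length : Int) = pos + (t.length : Int) + 1 := by ring
        have e2 : (1 : Int) + (t.length : Int) = (t.length : Int) + 1 := by ring
        rw [e1, e2]
      · -- non-uppercase head: both just move on
        rw [pvGoA, pvGoB]
        simp only [h, Bool.false_eq_true, if_false]
        have hlen : rest.length ≤ n := by simp at hn; omega
        rw [ih rest hlen (pos + 1) d (some c) (by simp [pvBoundaryPrev, h])]


-- ===== VERDICT (by name: the statement is the Claim_ definition above) =====
theorem get_anchor_dict_spec : Claim_equal_get_anchor_dict := by
  intro template _
  unfold Spec_get_anchor_dict get_anchor_dict get_anchor_dict_alt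
  rw [pvGoA_eq template.toList.length template.toList le_rfl 0 PySem.Dict.empty none rfl]
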